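-- pv_equiv track=rewrite | github.com/galid1/Algorithm | python/exams/21.08.14(toss)/3.py | right_split
-- ===== SOURCE A (Python) =====
-- def right_split(amountText):
--     texts = list(amountText)
--
--     while texts:
--         # 3개의 수 제거
--         for _ in range(3):
--             if not texts:
--                 break
--
--             if not texts.pop().isnumeric():
--                 return False
--
--         if texts and texts.pop() != ',':
--             return False
--
--     return True
-- ===== SOURCE B (Python) =====
-- def right_split(amountText):
--     first = True
--     for group in amountText.split(','):
--         if group and not group.isnumeric():
--             return False
--         if first:
--             if len(group) > 3:
--                 return False
--             first = False
--         elif len(group) != 3: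
--             return False
--     return True
-- ===== Notes on version B (the rewrite author's own statement) =====
-- stated objective: simpler
-- what changed: A pops characters off the end of a list one at a time (three digits then a comma per while-iteration); B instead splits the string on the comma separator once and checks each group in a single left-to-right pass (nonempty groups must be numeric, the first group has length at most 3, every later group exactly 3).
import Mathlib
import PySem

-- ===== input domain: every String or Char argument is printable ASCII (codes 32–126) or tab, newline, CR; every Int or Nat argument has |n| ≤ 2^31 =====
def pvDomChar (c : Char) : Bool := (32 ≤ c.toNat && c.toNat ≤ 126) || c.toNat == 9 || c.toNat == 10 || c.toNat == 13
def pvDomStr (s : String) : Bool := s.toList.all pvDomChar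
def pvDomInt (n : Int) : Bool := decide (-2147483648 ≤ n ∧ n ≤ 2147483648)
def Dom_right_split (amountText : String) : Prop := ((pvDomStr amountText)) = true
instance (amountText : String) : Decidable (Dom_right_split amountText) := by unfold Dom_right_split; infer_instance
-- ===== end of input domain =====

-- B replaces A's char-by-char right-to-left popping with a split-on-comma pass that checks each group's
-- digits and length (leftmost ≤ 3, others = 3): simpler, one idiomatic split + linear scan.


-- ===== PORT A =====
-- the while loop on texts = list(amountText); pops from the right.  '.isnumeric()' on a popped
-- single character is ported as PySem.Chars.isdigit (exact on the printable-ASCII domain).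
def right_split_loop (texts : List Char) : Bool :=
  if texts = [] then true          -- while texts: ... exits
  else
    -- 'for _ in range(3)' unrolled three times; each step breaks when texts is empty, else pops and tests
    match h1 : PySem.List.pop? texts with
    | none => true                 -- unreachable: texts ≠ []
    | some (c1, t1) =>
      if ¬ PySem.Chars.isdigit c1 then false
      else match h2 : PySem.List.pop? t1 with
      | none => true               -- for-loop break on empty; comma check skipped; while exits
      | some (c2, t2) =>
        if ¬ PySem.Chars.isdigit c2 then false
        else match h3 : PySem.List.pop? t2 with
        | none => true
        | some (c3, t3) =>
          if ¬ PySem.Chars.isdigit c3 then false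
          else match h4 : PySem.List.pop? t3 with
          | none => true           -- 'if texts and ...': texts empty, comma check skipped; while exits
          | some (c4, t4) =>
            if c4 ≠ ',' then false
            else right_split_loop t4
termination_by texts.length
decreasing_by
  have e1 : t1.length + 1 = texts.length := PySem.List.length_of_pop?_eq_some _ h1
  have e2 : t2.length + 1 = t1.length := PySem.List.length_of_pop?_eq_some _ h2
  have e3 : t3.length + 1 = t2.length := PySem.List.length_of_pop?_eq_some _ h3
  have e4 : t4.length + 1 = t3.length := PySem.List.length_of_pop?_eq_some _ h4
  omega

def right_split (amountText : String) : Bool :=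
  right_split_loop amountText.toList

-- ===== PORT B =====
-- the for loop of Source B over amountText.split(',') with its 'first' flag; group.isnumeric() is ported as
-- PySem.Chars.strIsdigit (exact on the printable-ASCII domain).
def checkGroups : Bool → List (List Char) → Bool
  | _, [] => true
  | first, g :: rest =>
    if g ≠ [] ∧ PySem.Chars.strIsdigit g = false then false
    else if first then
      (if 3 < g.length then false else checkGroups false rest)
    else if g.length ≠ 3 then false
    else checkGroups false rest

def right_split_alt (amountText : String) : Bool :=
  checkGroups true (PySem.Chars.splitOn amountText.toList [','])

-- ===== PRECONDITION & SPEC =====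
def Spec_right_split (amountText : String) (out : Bool) : Prop := out = right_split_alt amountText
instance (amountText : String) (out : Bool) : Decidable (Spec_right_split amountText out) := by unfold Spec_right_split; infer_instance

-- ===== CLAIM (what is proved, stated in full; the proofs are below) =====
def Claim_equal_right_split : Prop := ∀ (amountText : String), Dom_right_split amountText → Spec_right_split amountText (right_split amountText)

-- ===== LEMMAS AND PROOFS =====

-- structural (left-to-right) reformulation of A's right-to-left popping loop
def rsRev : List Char → Bool
  | [] => true
  | c1 :: r1 =>
    if ¬ PySem.Chars.isdigit c1 then false
    else match r1 with
    | [] => true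
    | c2 :: r2 =>
      if ¬ PySem.Chars.isdigit c2 then false
      else match r2 with
      | [] => true
      | c3 :: r3 =>
        if ¬ PySem.Chars.isdigit c3 then false
        else match r3 with
        | [] => true
        | c4 :: r4 =>
          if c4 ≠ ',' then false
          else rsRev r4

-- simple recursive characterization of Python's split(',')
def mySplit : List Char → List (List Char)
  | [] => [[]]
  | c :: rest =>
    if c = ',' then [] :: mySplit rest
    else (c :: (mySplit rest).headI) :: (mySplit rest).tail

-- what B demands of every group after the first
def tailOK (g : List Char) : Bool := PySem.Chars.strIsdigit g && decide (g.length = 3)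

theorem mySplit_ne_nil (l : List Char) : mySplit l ≠ [] := by
  cases l with
  | nil => simp [mySplit]
  | cons c rest => simp only [mySplit]; split <;> simp

theorem go_eq (fuel : Nat) (l : List Char) (cur : List Char) (acc : List (List Char))
    (hf : l.length ≤ fuel) :
    PySem.Chars.splitOn.go [','] fuel l cur acc
      = acc.reverse ++ (cur.reverse ++ (mySplit l).headI) :: (mySplit l).tail := by
  induction fuel generalizing l cur acc with
  | zero =>
    have : l = [] := by cases l <;> simp_all
    subst this
    simp [PySem.Chars.splitOn.go, mySplit]
  | succ n ih =>
    cases l with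
    | nil => simp [PySem.Chars.splitOn.go, mySplit]
    | cons c rest =>
      simp only [PySem.Chars.splitOn.go]
      by_cases hc : c = ','
      · subst hc
        have hp : List.isPrefixOf [','] (',' :: rest) = true := by simp [List.isPrefixOf]
        rw [if_pos hp]
        have hd : List.drop (List.length [',']) (',' :: rest) = rest := rfl
        rw [hd]
        simp only [List.length_cons] at hf
        rw [ih rest [] (List.reverse cur :: acc) (by omega)]
        rcases hm : mySplit rest with _ | ⟨g0, gs⟩
        · exact absurd hm (mySplit_ne_nil rest)
        · simp [mySplit, hm]
      · have hp : List.isPrefixOf [','] (c :: rest) = false := by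
          simp [List.isPrefixOf]; exact fun h => (hc h.symm).elim
        rw [if_neg (by simp [hp])]
        simp only [List.length_cons] at hf
        rw [ih rest (c :: cur) acc (by omega)]
        simp [mySplit, hc]

theorem splitOn_eq_mySplit (l : List Char) :
    PySem.Chars.splitOn l [','] = mySplit l := by
  unfold PySem.Chars.splitOn
  rw [go_eq (l.length + 1) l [] [] (by omega)]
  rcases h : mySplit l with _ | ⟨g, gs⟩
  · exact absurd h (mySplit_ne_nil l)
  · simp

theorem mySplit_no_comma (l : List Char) (h : ',' ∉ l) : mySplit l = [l] := by
  induction l with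
  | nil => simp [mySplit]
  | cons c rest ih =>
    simp only [List.mem_cons, not_or] at h
    simp [mySplit, ih h.2, Ne.symm h.1]

theorem mySplit_append (l1 g : List Char) (hg : ',' ∉ g) :
    mySplit (l1 ++ ',' :: g) = mySplit l1 ++ [g] := by
  induction l1 with
  | nil => simp [mySplit, mySplit_no_comma g hg]
  | cons c rest ih =>
    by_cases hc : c = ','
    · subst hc; simp [mySplit, ih]
    · simp only [List.cons_append, mySplit, hc, if_neg, ih]
      rcases h : mySplit rest with _ | ⟨g0, gs⟩
      · exact absurd h (mySplit_ne_nil rest)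
      · simp

theorem checkGroups_append (gs : List (List Char)) :
    ∀ (f : Bool) (g0 g : List Char),
      checkGroups f (g0 :: (gs ++ [g])) = (checkGroups f (g0 :: gs) && tailOK g) := by
  induction gs with
  | nil =>
    intro f g0 g
    simp only [List.nil_append]
    conv_lhs => rw [checkGroups.eq_2]
    conv_rhs => rw [checkGroups.eq_2]
    by_cases hgnil : g = []
    · split_ifs <;> simp_all [checkGroups, tailOK, PySem.Chars.strIsdigit]
    · split_ifs <;> simp_all [checkGroups, tailOK]
  | cons g1 gs' ih =>
    intro f g0 g
    simp only [List.cons_append]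
    conv_lhs => rw [checkGroups.eq_2]
    conv_rhs => rw [checkGroups.eq_2]
    split_ifs <;> simp [ih]

theorem rsRev_step (h t : List Char) (hns : ',' ∉ h) :
    rsRev (h ++ ',' :: t) = (tailOK h.reverse && rsRev t) := by
  match h with
  | [] =>
    rw [List.nil_append, rsRev.eq_def]
    simp [tailOK, PySem.Chars.strIsdigit, PySem.Chars.isdigit]
  | [c1] =>
    rw [List.cons_append, List.nil_append, rsRev.eq_def]
    by_cases h1 : PySem.Chars.isdigit c1 <;>
      simp [tailOK, PySem.Chars.strIsdigit, PySem.Chars.isdigit, h1]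
  | [c1, c2] =>
    rw [List.cons_append, List.cons_append, List.nil_append, rsRev.eq_def]
    by_cases h1 : PySem.Chars.isdigit c1 <;> by_cases h2 : PySem.Chars.isdigit c2 <;>
      simp [tailOK, PySem.Chars.strIsdigit, PySem.Chars.isdigit, h1, h2]
  | [c1, c2, c3] =>
    rw [List.cons_append, List.cons_append, List.cons_append, List.nil_append, rsRev.eq_def]
    by_cases h1 : PySem.Chars.isdigit c1 <;> by_cases h2 : PySem.Chars.isdigit c2 <;>
      by_cases h3 : PySem.Chars.isdigit c3 <;>
      simp [tailOK, PySem.Chars.strIsdigit, h1, h2, h3, Bool.and_comm, Bool.and_left_comm]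
  | c1 :: c2 :: c3 :: c4 :: rest =>
    have hc4 : c4 ≠ ',' := by
      intro hh; exact hns (by simp [hh])
    have hlen : ¬ (c1 :: c2 :: c3 :: c4 :: rest).reverse.length = 3 := by simp
    rw [List.cons_append, List.cons_append, List.cons_append, List.cons_append, rsRev.eq_def]
    by_cases h1 : PySem.Chars.isdigit c1 <;> by_cases h2 : PySem.Chars.isdigit c2 <;>
      by_cases h3 : PySem.Chars.isdigit c3 <;>
      simp [tailOK, h1, h2, h3, hc4, hlen]

theorem rsRev_no_comma (r : List Char) (h : ',' ∉ r) :
    rsRev r = checkGroups true [r.reverse] := by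
  match r with
  | [] => simp [rsRev.eq_def, checkGroups]
  | [c1] =>
    by_cases h1 : PySem.Chars.isdigit c1 <;>
      simp [rsRev.eq_def, checkGroups, PySem.Chars.strIsdigit, PySem.Chars.isdigit, h1]
  | [c1, c2] =>
    by_cases h1 : PySem.Chars.isdigit c1 <;> by_cases h2 : PySem.Chars.isdigit c2 <;>
      simp [rsRev.eq_def, checkGroups, PySem.Chars.strIsdigit, h1, h2]
  | [c1, c2, c3] =>
    by_cases h1 : PySem.Chars.isdigit c1 <;> by_cases h2 : PySem.Chars.isdigit c2 <;>
      by_cases h3 : PySem.Chars.isdigit c3 <;>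
      simp [rsRev.eq_def, checkGroups, PySem.Chars.strIsdigit, h1, h2, h3]
  | c1 :: c2 :: c3 :: c4 :: rest =>
    have hc4 : c4 ≠ ',' := by
      intro hh; exact h (by simp [hh])
    have hlen : ¬ (c1 :: c2 :: c3 :: c4 :: rest).reverse.length ≤ 3 := by simp
    by_cases h1 : PySem.Chars.isdigit c1 <;> by_cases h2 : PySem.Chars.isdigit c2 <;>
      by_cases h3 : PySem.Chars.isdigit c3 <;>
      simp [rsRev.eq_def, checkGroups, PySem.Chars.strIsdigit, h1, h2, h3, hc4, hlen]

theorem rsRev_eq_check : ∀ (r : List Char), rsRev r = checkGroups true (mySplit r.reverse) := by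
  intro r
  induction hn : r.length using Nat.strong_induction_on generalizing r with
  | _ n IH =>
  by_cases hc : (',' : Char) ∈ r
  · obtain ⟨h, t, rfl, hns⟩ := List.eq_append_cons_of_mem hc
    have hrev : (h ++ ',' :: t).reverse = t.reverse ++ ',' :: h.reverse := by simp
    have hg : (',' : Char) ∉ h.reverse := by simpa using hns
    have hlt : t.length < n := by
      simp only [List.length_append, List.length_cons] at hn; omega
    rw [rsRev_step h t hns, hrev, mySplit_append _ _ hg, IH t.length hlt t rfl]
    rcases hm : mySplit t.reverse with _ | ⟨g0, gs⟩
    · exact absurd hm (mySplit_ne_nil _)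
    · rw [List.cons_append, checkGroups_append, Bool.and_comm]
  · rw [rsRev_no_comma r hc, mySplit_no_comma _ (fun hmem => hc (List.mem_reverse.mp hmem))]

theorem pop?_rev_cons (x : Char) (xs : List Char) :
    PySem.List.pop? ((x :: xs).reverse) = some (x, xs.reverse) := by
  rw [List.reverse_cons]; exact PySem.List.pop?_last _ _

theorem loop_eq_rsRev : ∀ (r : List Char), right_split_loop r.reverse = rsRev r := by
  intro r
  induction hn : r.length using Nat.strong_induction_on generalizing r with
  | _ n IH =>
  match r with
  | [] => rw [List.reverse_nil, right_split_loop]; simp [rsRev]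
  | c1 :: r1 =>
    rw [right_split_loop, if_neg (by simp), rsRev.eq_def]
    split
    · next heq => rw [pop?_rev_cons] at heq; simp at heq
    · next a t heq =>
      rw [pop?_rev_cons] at heq; cases heq
      by_cases hd1 : PySem.Chars.isdigit c1
      · simp only [hd1, not_true_eq_false, Bool.false_eq_true, if_false]
        cases r1 with
        | nil =>
          split
          · rfl
          · next heq2 => simp [PySem.List.pop?, PySem.List.pyIdx?] at heq2
        | cons c2 r2 =>
          split
          · next heq2 => rw [pop?_rev_cons] at heq2; simp at heq2
          · next a2 t2 heq2 =>
            rw [pop?_rev_cons] at heq2; cases heq2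
            by_cases hd2 : PySem.Chars.isdigit c2
            · simp only [hd2, not_true_eq_false, Bool.false_eq_true, if_false]
              cases r2 with
              | nil =>
                split
                · rfl
                · next heq3 => simp [PySem.List.pop?, PySem.List.pyIdx?] at heq3
              | cons c3 r3 =>
                split
                · next heq3 => rw [pop?_rev_cons] at heq3; simp at heq3
                · next a3 t3 heq3 =>
                  rw [pop?_rev_cons] at heq3; cases heq3
                  by_cases hd3 : PySem.Chars.isdigit c3
                  · simp only [hd3, not_true_eq_false, Bool.false_eq_true, if_false]
                    cases r3 with
                    | nil =>
                      split
                      · rfl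
                      · next heq4 => simp [PySem.List.pop?, PySem.List.pyIdx?] at heq4
                    | cons c4 r4 =>
                      split
                      · next heq4 => rw [pop?_rev_cons] at heq4; simp at heq4
                      · next a4 t4 heq4 =>
                        rw [pop?_rev_cons] at heq4; cases heq4
                        by_cases hc : c4 = ','
                        · subst hc
                          simp only [ne_eq, not_true_eq_false, Bool.false_eq_true, if_false]
                          have hl : r4.length < n := by
                            simp only [List.length_cons] at hn; omega
                          simpa using IH r4.length hl r4 rfl
                        · simp [hc]
                  · simp [hd3]
            · simp [hd2]
      · simp [hd1]

-- ===== VERDICT (by name: the statement is the Claim_ definition above) =====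
theorem right_split_spec : Claim_equal_right_split := by
  intro s _
  unfold Spec_right_split right_split right_split_alt
  rw [splitOn_eq_mySplit]
  have h := loop_eq_rsRev s.toList.reverse
  rw [List.reverse_reverse] at h
  rw [h, rsRev_eq_check, List.reverse_reverse]
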